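-- pv_equiv track=rewrite | github.com/jhhuh/hole-driven-development-skill | tests/baselines/h3-merge/merge3.py | _collapse_equal
-- ===== SOURCE A (Python) =====
-- def _collapse_equal(blocks: list[tuple[str, int, int, int, int]]) -> list[tuple[str, int, int, int, int]]:
--     """Merge consecutive equal blocks and consecutive replace blocks."""
--     if not blocks:
--         return blocks
--     out = [blocks[0]]
--     for b in blocks[1:]:
--         prev = out[-1]
--         if b[0] == prev[0]:
--             out[-1] = (prev[0], prev[1], b[2], prev[3], b[4])
--         else:
--             out.append(b)
--     return out
-- ===== SOURCE B (Python) =====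
-- def _collapse_equal(blocks: list[tuple[str, int, int, int, int]]) -> list[tuple[str, int, int, int, int]]:
--     """Merge consecutive blocks of the same tag: run scan, emit each run
--     from its first and last member instead of mutating a previous tuple."""
--     out = []
--     i, n = 0, len(blocks)
--     while i < n:
--         tag = blocks[i][0]
--         j = i + 1
--         while j < n and blocks[j][0] == tag:
--             j += 1
--         first, last = blocks[i], blocks[j - 1]
--         out.append((tag, first[1], last[2], first[3], last[4]))
--         i = j
--     return out
-- ===== Notes on version B (the rewrite author's own statement) =====
-- stated objective: alternative
-- what changed: Replaced the running-accumulator fold that repeatedly rewrites the last output tuple with a run scan that finds each maximal run of equal tags and emits the merged tuple once from the run's first and last members.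
import Mathlib
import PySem

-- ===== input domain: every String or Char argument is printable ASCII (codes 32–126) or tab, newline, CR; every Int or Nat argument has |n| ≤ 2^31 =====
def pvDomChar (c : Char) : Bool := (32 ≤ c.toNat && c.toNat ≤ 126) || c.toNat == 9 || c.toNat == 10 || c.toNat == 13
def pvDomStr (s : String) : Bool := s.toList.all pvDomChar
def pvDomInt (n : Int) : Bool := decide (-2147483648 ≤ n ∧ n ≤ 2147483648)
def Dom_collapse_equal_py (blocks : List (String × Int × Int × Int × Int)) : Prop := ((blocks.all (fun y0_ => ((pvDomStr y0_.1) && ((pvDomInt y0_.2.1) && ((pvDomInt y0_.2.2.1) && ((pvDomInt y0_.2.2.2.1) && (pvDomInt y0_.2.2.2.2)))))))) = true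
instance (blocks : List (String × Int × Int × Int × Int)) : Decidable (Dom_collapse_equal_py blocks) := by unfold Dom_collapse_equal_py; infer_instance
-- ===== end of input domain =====

-- B replaces A's running-accumulator merge (mutating the last output tuple) with a
-- run scan that emits each maximal same-tag run once from its first and last member
-- (alternative decomposition, same O(n) cost).


-- ===== PORT A =====
-- one step of A's loop body: look at out[-1], either rewrite it in place or append b
def collapseStepA (out : List (String × Int × Int × Int × Int))
    (b : String × Int × Int × Int × Int) : List (String × Int × Int × Int × Int) :=
  match out.getLast? with
  | none => [b]  -- unreachable: out starts nonempty and never shrinks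
  | some prev =>
    if b.1 == prev.1 then
      out.dropLast ++ [(prev.1, prev.2.1, b.2.2.1, prev.2.2.2.1, b.2.2.2.2)]
    else
      out ++ [b]

def collapse_equal_py (blocks : List (String × Int × Int × Int × Int)) : List (String × Int × Int × Int × Int) :=
  match blocks with
  | [] => []
  | b0 :: rest => rest.foldl collapseStepA [b0]

-- ===== PORT B =====
-- the inner while: scan forward over the run of tag `tag`, returning (run, remainder)
def runSplit (tag : String) : List (String × Int × Int × Int × Int) →
    List (String × Int × Int × Int × Int) × List (String × Int × Int × Int × Int)
  | [] => ([], [])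
  | b :: bs =>
    if b.1 == tag then
      let r := runSplit tag bs
      (b :: r.1, r.2)
    else ([], b :: bs)

theorem runSplit_snd_length (tag : String) (bs : List (String × Int × Int × Int × Int)) :
    (runSplit tag bs).2.length ≤ bs.length := by
  induction bs with
  | nil => simp [runSplit]
  | cons b bs ih =>
    simp only [runSplit]
    split
    · exact Nat.le_succ_of_le ih
    · simp

def collapse_equal_py_alt : List (String × Int × Int × Int × Int) → List (String × Int × Int × Int × Int)
  | [] => []
  | first :: bs =>
    let pr := runSplit first.1 bs
    let last := pr.1.getLast?.getD first
    (first.1, first.2.1, last.2.2.1, first.2.2.2.1, last.2.2.2.2) :: collapse_equal_py_alt pr.2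
termination_by blocks => blocks.length
decreasing_by
  exact Nat.lt_succ_of_le (runSplit_snd_length first.1 bs)

-- ===== PRECONDITION & SPEC =====
def Spec_collapse_equal_py (blocks : List (String × Int × Int × Int × Int)) (out : List (String × Int × Int × Int × Int)) : Prop := out = collapse_equal_py_alt blocks
instance (blocks : List (String × Int × Int × Int × Int)) (out : List (String × Int × Int × Int × Int)) : Decidable (Spec_collapse_equal_py blocks out) := by unfold Spec_collapse_equal_py; infer_instance

-- ===== CLAIM (what is proved, stated in full; the proofs are below) =====
def Claim_equal_collapse_equal_py : Prop := ∀ (blocks : List (String × Int × Int × Int × Int)), Dom_collapse_equal_py blocks → Spec_collapse_equal_py blocks (collapse_equal_py blocks)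

-- ===== LEMMAS AND PROOFS =====

theorem alt_nil : collapse_equal_py_alt [] = [] := by
  rw [collapse_equal_py_alt.eq_def]

theorem alt_cons (first : String × Int × Int × Int × Int)
    (bs : List (String × Int × Int × Int × Int)) :
    collapse_equal_py_alt (first :: bs) =
      (first.1, first.2.1, (((runSplit first.1 bs).1.getLast?.getD first).2.2.1 : Int),
        first.2.2.2.1, ((runSplit first.1 bs).1.getLast?.getD first).2.2.2.2) ::
      collapse_equal_py_alt (runSplit first.1 bs).2 := by
  rw [collapse_equal_py_alt.eq_def]

-- A's fold never touches the already-finalised prefix: a prefix before the last element passes through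
theorem foldl_stepA_append (rest : List (String × Int × Int × Int × Int)) :
    ∀ (ys : List (String × Int × Int × Int × Int)) (p : String × Int × Int × Int × Int),
    rest.foldl collapseStepA (ys ++ [p]) = ys ++ rest.foldl collapseStepA [p] := by
  induction rest with
  | nil => intro ys p; rfl
  | cons b rest ih =>
    intro ys p
    simp only [List.foldl_cons]
    have hstep : collapseStepA (ys ++ [p]) b =
        if b.1 == p.1 then
          ys ++ [(p.1, p.2.1, b.2.2.1, p.2.2.2.1, b.2.2.2.2)]
        else (ys ++ [p]) ++ [b] := by
      simp [collapseStepA]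
    have hstep1 : collapseStepA [p] b =
        if b.1 == p.1 then
          [(p.1, p.2.1, b.2.2.1, p.2.2.2.1, b.2.2.2.2)]
        else [p] ++ [b] := by
      simp [collapseStepA]
    rw [hstep, hstep1]
    by_cases h : (b.1 == p.1) = true
    · rw [if_pos h, if_pos h]
      exact ih ys _
    · rw [if_neg h, if_neg h]
      rw [ih (ys ++ [p]) b, ih [p] b, List.append_assoc]

-- A's fold from a single seed computes B's run decomposition
theorem foldl_stepA_runSplit (bs : List (String × Int × Int × Int × Int)) :
    ∀ (p : String × Int × Int × Int × Int),
    bs.foldl collapseStepA [p] =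
      (p.1, p.2.1, (((runSplit p.1 bs).1.getLast?.getD p).2.2.1 : Int), p.2.2.2.1,
        ((runSplit p.1 bs).1.getLast?.getD p).2.2.2.2) ::
      collapse_equal_py_alt (runSplit p.1 bs).2 := by
  induction bs with
  | nil =>
    intro p
    obtain ⟨t, s1, e1, s2, e2⟩ := p
    simp [runSplit, alt_nil]
  | cons b bs ih =>
    intro p
    simp only [List.foldl_cons]
    by_cases h : (b.1 == p.1) = true
    · have hstep : collapseStepA [p] b = [(p.1, p.2.1, b.2.2.1, p.2.2.2.1, b.2.2.2.2)] := by
        simp [collapseStepA, h]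
      rw [hstep, ih (p.1, p.2.1, b.2.2.1, p.2.2.2.1, b.2.2.2.2)]
      simp only [runSplit, h, if_pos]
      cases hr : (runSplit p.1 bs).1 with
      | nil => simp
      | cons x xs =>
        obtain ⟨l, hl⟩ : ∃ l, (x :: xs).getLast? = some l :=
          ⟨_, List.getLast?_eq_some_getLast (by simp)⟩
        simp [hl]
    · have hstep : collapseStepA [p] b = [p] ++ [b] := by
        simp [collapseStepA, h]
      rw [hstep, foldl_stepA_append bs [p] b, ih b]
      have hrs : runSplit p.1 (b :: bs) = ([], b :: bs) := by simp [runSplit, h]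
      rw [hrs, alt_cons]
      obtain ⟨t, s1, e1, s2, e2⟩ := p
      simp

theorem collapse_eq_alt (blocks : List (String × Int × Int × Int × Int)) :
    collapse_equal_py blocks = collapse_equal_py_alt blocks := by
  cases blocks with
  | nil => simp [collapse_equal_py, alt_nil]
  | cons b0 rest =>
    rw [collapse_equal_py, foldl_stepA_runSplit rest b0, alt_cons]

-- ===== VERDICT (by name: the statement is the Claim_ definition above) =====
theorem collapse_equal_py_spec : Claim_equal_collapse_equal_py := by
  intro blocks _
  exact collapse_eq_alt blocks
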